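-- pv_equiv track=rewrite | github.com/kobeeraveendran/programming-practice | launchSequenceChecker.py | launchSequenceChecker
-- ===== SOURCE A (Python) =====
-- def launchSequenceChecker(systemNames, stepNumbers):
--     unique_systems = {}
--
--     for i in range(len(systemNames)):
--         if systemNames[i] in unique_systems:
--             unique_systems[systemNames[i]].append(stepNumbers[i])
--         else:
--             unique_systems[systemNames[i]] = [stepNumbers[i]]
--
--     for key in unique_systems:
--         if not is_ascending(unique_systems[key]):
--             return False
--
--     return True
--
-- def is_ascending(launch_sequence):
--     if len(set(launch_sequence)) != len(launch_sequence):
--         return False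
--
--     launch_sorted = sorted(launch_sequence)
--
--     for i in range(len(launch_sequence)):
--         if launch_sequence[i] != launch_sorted[i]:
--             return False
--
--     return True
-- ===== SOURCE B (Python) =====
-- def launchSequenceChecker(systemNames, stepNumbers):
--     last = {}
--     for name, step in zip(systemNames, stepNumbers):
--         if name in last and step <= last[name]:
--             return False
--         last[name] = step
--     return True
-- ===== Notes on version B (the rewrite author's own statement) =====
-- stated objective: faster
-- what changed: Instead of grouping steps into a dict of lists and checking each group by building a set and a sorted copy, B does one linear pass over zip(systemNames, stepNumbers) keeping only each system's last step number and failing as soon as a step does not strictly exceed it.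
import Mathlib
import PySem

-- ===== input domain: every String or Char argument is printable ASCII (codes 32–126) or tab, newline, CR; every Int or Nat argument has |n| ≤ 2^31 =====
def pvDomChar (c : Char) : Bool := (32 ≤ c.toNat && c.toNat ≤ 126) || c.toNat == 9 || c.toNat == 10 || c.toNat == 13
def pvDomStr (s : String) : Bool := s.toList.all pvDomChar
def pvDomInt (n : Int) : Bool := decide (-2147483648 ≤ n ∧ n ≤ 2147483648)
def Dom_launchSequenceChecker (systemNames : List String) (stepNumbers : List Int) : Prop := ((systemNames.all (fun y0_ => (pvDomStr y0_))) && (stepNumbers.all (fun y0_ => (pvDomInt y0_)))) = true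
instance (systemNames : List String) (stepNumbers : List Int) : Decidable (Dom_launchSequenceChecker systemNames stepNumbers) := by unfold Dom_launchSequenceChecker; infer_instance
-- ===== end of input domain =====

-- B replaces A's group-into-dict-of-lists + per-group sort/dedup check by a single pass
-- that only remembers each system's last step number (objective: faster).

-- ===== PORT A =====

-- helper is_ascending: duplicate check via set, then elementwise comparison with sorted copy
def isAscending (launch_sequence : List Int) : Bool :=
  if (PySem.Set.ofList launch_sequence).length ≠ launch_sequence.length then false
  else
    (PySem.List.pyRange 0 (launch_sequence.length : Int)).foldl
      (fun ok i =>
        if PySem.List.pyGetD launch_sequence i 0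
            ≠ PySem.List.pyGetD (PySem.List.sorted launch_sequence (fun x => x)) i 0
        then false else ok) true

def launchSequenceChecker (systemNames : List String) (stepNumbers : List Int) : Bool :=
  let unique_systems :=
    (PySem.List.pyRange 0 (systemNames.length : Int)).foldl
      (fun d i =>
        let name := PySem.List.pyGetD systemNames i ""
        if d.contains name then
          d.modify name [] (fun v => v ++ [PySem.List.pyGetD stepNumbers i 0])
        else
          d.insert name [PySem.List.pyGetD stepNumbers i 0])
      PySem.Dict.empty
  unique_systems.keys.foldl
    (fun ok key => if !isAscending (unique_systems.getD key []) then false else ok) true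

-- ===== PORT B =====

-- single pass over zip(systemNames, stepNumbers), remembering each system's last step
def altGo : List (String × Int) → PySem.Dict String Int → Bool
  | [], _ => true
  | (name, step) :: rest, last =>
    match last.get? name with
    | some v => if step ≤ v then false else altGo rest (last.insert name step)
    | none => altGo rest (last.insert name step)

def launchSequenceChecker_alt (systemNames : List String) (stepNumbers : List Int) : Bool :=
  altGo (systemNames.zip stepNumbers) PySem.Dict.empty

-- ===== PRECONDITION & SPEC =====
-- Pre_ excludes exactly the inputs where A raises IndexError (fewer step numbers than system names).
def Pre_launchSequenceChecker (systemNames : List String) (stepNumbers : List Int) : Prop :=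
  systemNames.length ≤ stepNumbers.length
instance (systemNames : List String) (stepNumbers : List Int) : Decidable (Pre_launchSequenceChecker systemNames stepNumbers) := by unfold Pre_launchSequenceChecker; infer_instance

def pvWitness_launchSequenceChecker : List String × List Int := (["a", "b", "a"], [1, 1, 2])

def Spec_launchSequenceChecker (systemNames : List String) (stepNumbers : List Int) (out : Bool) : Prop := out = launchSequenceChecker_alt systemNames stepNumbers
instance (systemNames : List String) (stepNumbers : List Int) (out : Bool) : Decidable (Spec_launchSequenceChecker systemNames stepNumbers out) := by unfold Spec_launchSequenceChecker; infer_instance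

-- ===== CLAIM (what is proved, stated in full; the proofs are below) =====
def Claim_equal_launchSequenceChecker : Prop := ∀ (systemNames : List String) (stepNumbers : List Int), Dom_launchSequenceChecker systemNames stepNumbers → Pre_launchSequenceChecker systemNames stepNumbers → Spec_launchSequenceChecker systemNames stepNumbers (launchSequenceChecker systemNames stepNumbers)

-- ===== LEMMAS AND PROOFS =====

-- the per-system occurrence list: step numbers of system c, in input order
def occOf (l : List (String × Int)) (c : String) : List Int :=
  (l.filter (fun p => decide (p.1 = c))).map Prod.snd

lemma occOf_cons (name : String) (step : Int) (l : List (String × Int)) (c : String) :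
    occOf ((name, step) :: l) c = if name = c then step :: occOf l c else occOf l c := by
  by_cases h : name = c <;> simp [occOf, h]

-- both early-return loops have this shape: the accumulator flips to false on a hit and stays
lemma foldl_guard_iff {α : Type} (p : α → Prop) [DecidablePred p] (l : List α) (b : Bool) :
    l.foldl (fun ok x => if p x then false else ok) b = true ↔ b = true ∧ ∀ x ∈ l, ¬ p x := by
  induction l generalizing b with
  | nil => simp
  | cons x t ih =>
    rw [List.foldl_cons]
    by_cases hp : p x
    · rw [if_pos hp, ih]
      simp [hp]
    · rw [if_neg hp, ih]
      simp [hp]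

-- ---- PySem.Set.ofList length ↔ Nodup ----
lemma foldlAdd_of_nodup (l acc : List Int) (h : (acc ++ l).Nodup) :
    l.foldl PySem.Set.add acc = acc ++ l := by
  induction l generalizing acc with
  | nil => simp
  | cons x t ih =>
    have hx : x ∉ acc := by
      intro hmem
      exact (List.disjoint_of_nodup_append h) hmem (by simp)
    have hcont : ¬ (PySem.Set.contains acc x = true) := by
      simpa [PySem.Set.contains] using hx
    have hadd : PySem.Set.add acc x = acc ++ [x] := by
      unfold PySem.Set.add
      rw [if_neg hcont]
    rw [List.foldl_cons, hadd, ih (acc ++ [x]) (by simpa using h)]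
    simp

lemma foldlAdd_sublist (l acc : List Int) : (l.foldl PySem.Set.add acc).Sublist (acc ++ l) := by
  induction l generalizing acc with
  | nil => simp
  | cons x t ih =>
    rw [List.foldl_cons]
    by_cases h : PySem.Set.contains acc x = true
    · have hadd : PySem.Set.add acc x = acc := by
        unfold PySem.Set.add
        rw [if_pos h]
      rw [hadd]
      exact (ih acc).trans ((List.sublist_cons_self x t).append_left acc)
    · have hadd : PySem.Set.add acc x = acc ++ [x] := by
        unfold PySem.Set.add
        rw [if_neg h]
      rw [hadd]
      simpa using ih (acc ++ [x])

lemma ofList_length_iff_nodup (l : List Int) :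
    (PySem.Set.ofList l).length = l.length ↔ l.Nodup := by
  constructor
  · intro h
    have hsub : (PySem.Set.ofList l).Sublist l := by
      have := foldlAdd_sublist l []
      simpa [PySem.Set.ofList_eq_foldl] using this
    have heq : PySem.Set.ofList l = l := hsub.eq_of_length h
    rw [← heq]
    exact PySem.Set.nodup_ofList l
  · intro h
    have : PySem.Set.ofList l = l := by
      have := foldlAdd_of_nodup l [] (by simpa using h)
      simpa [PySem.Set.ofList_eq_foldl] using this
    rw [this]

-- ---- isAscending characterisation ----
lemma isAscending_iff (l : List Int) : isAscending l = true ↔ l.Pairwise (· < ·) := by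
  have hlen : (PySem.List.sorted l (fun x => x)).length = l.length :=
    PySem.List.length_sorted l _ _
  have hloop : ((PySem.List.pyRange 0 (l.length : Int)).foldl
      (fun ok i =>
        if PySem.List.pyGetD l i 0 ≠ PySem.List.pyGetD (PySem.List.sorted l (fun x => x)) i 0
        then false else ok) true)
      = true ↔ l = PySem.List.sorted l (fun x => x) := by
    rw [foldl_guard_iff
      (fun i => PySem.List.pyGetD l i 0 ≠ PySem.List.pyGetD (PySem.List.sorted l (fun x => x)) i 0)]
    simp only [true_and, not_not]
    constructor
    · intro h
      apply List.ext_getElem (hlen.symm)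
      intro i h1 h2
      have hi := h (i : Int) (by rw [PySem.List.mem_pyRange_one]; omega)
      rwa [PySem.List.pyGetD_eq_getElem l 0 (by omega) (by exact_mod_cast h1),
           PySem.List.pyGetD_eq_getElem _ 0 (by omega) (by exact_mod_cast (hlen ▸ h1))] at hi
    · intro h i hi
      rw [← h]
  constructor
  · intro h
    unfold isAscending at h
    by_cases hset : (PySem.Set.ofList l).length ≠ l.length
    · rw [if_pos hset] at h
      exact absurd h (by simp)
    · rw [if_neg hset] at h
      rw [not_not] at hset
      have hnd : l.Nodup := (ofList_length_iff_nodup l).1 hset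
      have hls : l = PySem.List.sorted l (fun x => x) := hloop.1 h
      have hle : l.Pairwise (· ≤ ·) := by
        have := PySem.List.sorted_pairwise l (fun x => x)
        rw [← hls] at this
        exact this
      exact (hle.and hnd).imp (fun hp => lt_of_le_of_ne hp.1 hp.2)
  · intro h
    have hnd : l.Nodup := h.imp ne_of_lt
    have hls : PySem.List.sorted l (fun x => x) = l :=
      PySem.List.sorted_eq_of_perm_of_pairwise_lt l l (fun x => x) (List.Perm.refl l) h
    unfold isAscending
    rw [if_neg (by rw [not_not]; exact (ofList_length_iff_nodup l).2 hnd)]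
    rw [hloop]
    exact hls.symm

-- ---- A's grouping loop, rephrased over the zip ----
def groupStep (d : PySem.Dict String (List Int)) (p : String × Int) : PySem.Dict String (List Int) :=
  if d.contains p.1 then d.modify p.1 [] (fun v => v ++ [p.2]) else d.insert p.1 [p.2]

lemma range_fold_eq_zip_fold {δ : Type} (G : δ → String × Int → δ)
    (names : List String) (steps : List Int) (init : δ)
    (h : names.length ≤ steps.length) :
    (List.range names.length).foldl
      (fun d k => G d (names.getD k "", steps.getD k 0)) init
      = (names.zip steps).foldl G init := by
  induction names generalizing steps init with
  | nil => simp
  | cons n t ih =>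
    cases steps with
    | nil => simp at h
    | cons s ts =>
      rw [List.length_cons, List.range_succ_eq_map, List.foldl_cons, List.foldl_map]
      simp only [List.getD_cons_zero, List.getD_cons_succ, List.zip_cons_cons, List.foldl_cons]
      exact ih ts (G init (n, s)) (by simpa using h)

lemma groupFold_getD (l : List (String × Int)) (d : PySem.Dict String (List Int)) (c : String) :
    (l.foldl groupStep d).getD c [] = d.getD c [] ++ occOf l c := by
  induction l generalizing d with
  | nil => simp [occOf]
  | cons p t ih =>
    obtain ⟨name, step⟩ := p
    rw [List.foldl_cons, ih, occOf_cons]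
    have hstep : (groupStep d (name, step)).getD c [] =
        if c = name then d.getD c [] ++ [step] else d.getD c [] := by
      unfold groupStep
      by_cases hcont : d.contains name = true
      · rw [if_pos hcont, PySem.Dict.getD_modify]
        by_cases hc : c = name <;> simp [hc]
      · rw [if_neg hcont, PySem.Dict.getD_insert]
        by_cases hc : c = name
        · subst hc
          rw [if_pos rfl, PySem.Dict.getD_of_not_contains d [] (eq_false_of_ne_true hcont)]
          simp
        · simp [hc]
    rw [hstep]
    by_cases hc : c = name
    · subst hc
      simp
    · rw [if_neg hc, if_neg (fun h => hc h.symm)]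

lemma groupFold_mem_keys (l : List (String × Int)) (d : PySem.Dict String (List Int)) (c : String) :
    c ∈ (l.foldl groupStep d).keys ↔ c ∈ d.keys ∨ ∃ p ∈ l, p.1 = c := by
  induction l generalizing d with
  | nil => simp
  | cons p t ih =>
    obtain ⟨name, step⟩ := p
    rw [List.foldl_cons, ih]
    have hstep : c ∈ (groupStep d (name, step)).keys ↔ c = name ∨ c ∈ d.keys := by
      unfold groupStep
      by_cases hcont : d.contains name = true
      · rw [if_pos hcont, PySem.Dict.keys_modify]
        exact PySem.Dict.mem_keys_insert d name c _
      · rw [if_neg hcont]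
        exact PySem.Dict.mem_keys_insert d name c _
    rw [hstep]
    constructor
    · rintro (⟨h | h⟩ | ⟨q, hq, hqc⟩)
      · exact Or.inr ⟨(name, step), by simp, h.symm⟩
      · exact Or.inl h
      · exact Or.inr ⟨q, by simp [hq], hqc⟩
    · rintro (h | ⟨q, hq, hqc⟩)
      · exact Or.inl (Or.inr h)
      · rcases List.mem_cons.1 hq with h | h
        · subst h
          exact Or.inl (Or.inl hqc.symm)
        · exact Or.inr ⟨q, h, hqc⟩

-- ---- A = true iff every system's occurrence list is strictly increasing ----
lemma launchSequenceChecker_iff (names : List String) (steps : List Int)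
    (h : names.length ≤ steps.length) :
    launchSequenceChecker names steps = true ↔
      ∀ c, (occOf (names.zip steps) c).Pairwise (· < ·) := by
  unfold launchSequenceChecker
  have hfold : (PySem.List.pyRange 0 (names.length : Int)).foldl
      (fun d i =>
        let name := PySem.List.pyGetD names i ""
        if d.contains name then
          d.modify name [] (fun v => v ++ [PySem.List.pyGetD steps i 0])
        else
          d.insert name [PySem.List.pyGetD steps i 0])
      PySem.Dict.empty
      = (names.zip steps).foldl groupStep PySem.Dict.empty := by
    rw [PySem.List.pyRange_zero_natCast, List.foldl_map]
    rw [← range_fold_eq_zip_fold groupStep names steps PySem.Dict.empty h]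
    apply PySem.List.foldl_congr_mem
    intro d k hk
    simp only [PySem.List.pyGetD_natCast, groupStep]
  rw [hfold]
  rw [foldl_guard_iff (fun key =>
    (!isAscending (((names.zip steps).foldl groupStep PySem.Dict.empty).getD key [])) = true)]
  simp only [true_and, Bool.not_eq_eq_eq_not, Bool.not_true, Bool.not_eq_false]
  constructor
  · intro hall c
    by_cases hc : c ∈ ((names.zip steps).foldl groupStep PySem.Dict.empty).keys
    · have := hall c hc
      rw [isAscending_iff, groupFold_getD, PySem.Dict.getD_empty] at this
      simpa using this
    · have hnone : ¬ ∃ p ∈ names.zip steps, p.1 = c := by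
        intro hex
        exact hc ((groupFold_mem_keys _ _ _).2 (Or.inr hex))
      have hocc : occOf (names.zip steps) c = [] := by
        rw [occOf, List.map_eq_nil_iff, List.filter_eq_nil_iff]
        intro p hp
        simp only [decide_eq_true_eq]
        exact fun hpc => hnone ⟨p, hp, hpc⟩
      rw [hocc]
      exact List.Pairwise.nil
  · intro hall k _
    rw [isAscending_iff, groupFold_getD, PySem.Dict.getD_empty]
    simpa using hall k

-- ---- B = true iff every system's occurrence list is strictly increasing ----
lemma altGo_iff (l : List (String × Int)) (last : PySem.Dict String Int) :
    altGo l last = true ↔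
      ∀ c, List.IsChain (· < ·) (((last.get? c).toList) ++ occOf l c) := by
  induction l generalizing last with
  | nil =>
    simp only [altGo, occOf, List.filter_nil, List.map_nil, List.append_nil, true_iff]
    intro c
    cases last.get? c with
    | none => exact List.isChain_nil
    | some v => exact List.isChain_singleton v
  | cons p t ih =>
    obtain ⟨name, step⟩ := p
    have hocc : ∀ c, occOf ((name, step) :: t) c = if name = c then step :: occOf t c else occOf t c :=
      occOf_cons name step t
    show (match last.get? name with
      | some v => if step ≤ v then false else altGo t (last.insert name step)
      | none => altGo t (last.insert name step)) = true ↔ _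
    cases hg : last.get? name with
    | some v =>
      show (if step ≤ v then false else altGo t (last.insert name step)) = true ↔ _
      by_cases hle : step ≤ v
      · rw [if_pos hle]
        refine iff_of_false (by simp) (fun hall => ?_)
        have h2 := hall name
        rw [hg, hocc name, if_pos rfl] at h2
        simp only [Option.toList_some, List.cons_append, List.nil_append] at h2
        rw [List.isChain_cons_cons] at h2
        obtain ⟨hvs, -⟩ := h2
        omega
      · rw [if_neg hle, ih]
        apply forall_congr'
        intro c
        by_cases hc : c = name
        · subst hc
          rw [PySem.Dict.get?_insert_self, hg, hocc c, if_pos rfl]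
          simp only [Option.toList_some, List.cons_append, List.nil_append]
          rw [List.isChain_cons_cons]
          constructor
          · intro h
            exact ⟨by omega, h⟩
          · exact fun h => h.2
        · rw [PySem.Dict.get?_insert_of_ne last step hc, hocc c, if_neg (fun h => hc h.symm)]
    | none =>
      show altGo t (last.insert name step) = true ↔ _
      rw [ih]
      apply forall_congr'
      intro c
      by_cases hc : c = name
      · subst hc
        rw [PySem.Dict.get?_insert_self, hg, hocc c, if_pos rfl]
        exact Iff.rfl
      · rw [PySem.Dict.get?_insert_of_ne last step hc, hocc c, if_neg (fun h => hc h.symm)]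

lemma alt_iff (names : List String) (steps : List Int) :
    launchSequenceChecker_alt names steps = true ↔
      ∀ c, (occOf (names.zip steps) c).Pairwise (· < ·) := by
  unfold launchSequenceChecker_alt
  rw [altGo_iff]
  apply forall_congr'
  intro c
  rw [PySem.Dict.get?_empty]
  simp only [Option.toList_none, List.nil_append]
  exact List.isChain_iff_pairwise

-- ===== VERDICT (by name: the statement is the Claim_ definition above) =====
theorem launchSequenceChecker_spec : Claim_equal_launchSequenceChecker := by
  intro names steps _ hpre
  unfold Spec_launchSequenceChecker
  rw [Bool.eq_iff_iff, launchSequenceChecker_iff names steps hpre, alt_iff]
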